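-- pv_equiv track=rewrite | github.com/diwadd/sport | cc_tic_tac_toe.py | get_n_cols
-- ===== SOURCE A (Python) =====
-- def get_n_cols(tictactoe, player):
--
--     n = len(tictactoe)
--     n_cols = 0
--     for i in range(n):
--         os = 0
--         for j in range(n):
--             if tictactoe[j][i] == player:
--                 os +=1
--         if os == n:
--             n_cols += 1
--
--     return n_cols
-- ===== SOURCE B (Python) =====
-- def get_n_cols(tictactoe, player):
--     n = len(tictactoe)
--     counts = [0] * n
--     for row in tictactoe:
--         counts = [c + (1 if row[i] == player else 0) for i, c in enumerate(counts)]
--     return sum(1 for c in counts if c == n)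
-- ===== Notes on version B (the rewrite author's own statement) =====
-- stated objective: alternative
-- what changed: B replaces A's column-major scan with a reset per-column counter by a single row-major pass that maintains a tally of all n per-column counters at once, then counts tallies equal to n.
import Mathlib
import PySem

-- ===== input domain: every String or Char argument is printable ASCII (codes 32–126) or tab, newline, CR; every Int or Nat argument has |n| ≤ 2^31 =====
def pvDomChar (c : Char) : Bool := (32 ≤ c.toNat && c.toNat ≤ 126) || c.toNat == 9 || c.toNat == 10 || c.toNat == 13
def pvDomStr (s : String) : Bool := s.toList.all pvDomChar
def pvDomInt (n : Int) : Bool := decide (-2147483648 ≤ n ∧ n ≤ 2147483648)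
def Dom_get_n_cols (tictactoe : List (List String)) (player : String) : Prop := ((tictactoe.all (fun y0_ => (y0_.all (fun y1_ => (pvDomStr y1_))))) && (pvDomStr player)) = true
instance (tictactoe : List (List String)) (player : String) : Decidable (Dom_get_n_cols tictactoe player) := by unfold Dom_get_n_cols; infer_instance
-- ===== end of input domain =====

-- B replaces A's column-major scan (one counter, reset per column) by a single row-major
-- pass maintaining all n per-column tallies at once; objective: alternative decomposition.

-- ===== PORT A =====
def get_n_cols (tictactoe : List (List String)) (player : String) : Int :=
  let n : Int := tictactoe.length
  (PySem.List.pyRange 0 n 1).foldl (fun n_cols i =>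
    let os : Int := (PySem.List.pyRange 0 n 1).foldl (fun os j =>
      if PySem.List.pyGetD (PySem.List.pyGetD tictactoe j []) i "" == player then os + 1 else os) 0
    if os == n then n_cols + 1 else n_cols) 0

-- ===== PORT B =====
def get_n_cols_alt (tictactoe : List (List String)) (player : String) : Int :=
  let n : Int := tictactoe.length
  let counts0 : List Int := List.replicate tictactoe.length 0
  let counts := tictactoe.foldl (fun counts row =>
    (PySem.List.enumerate counts).map (fun ic =>
      ic.2 + (if PySem.List.pyGetD row ic.1 "" == player then (1:Int) else 0))) counts0
  counts.foldl (fun acc c => if c == n then acc + 1 else acc) 0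

-- ===== PRECONDITION & SPEC =====
-- Pre_: the Python A indexes tictactoe[j][i] for all i, j < len(tictactoe), so it raises
-- IndexError when some row is shorter than the number of rows; exactly those inputs are excluded.
def Pre_get_n_cols (tictactoe : List (List String)) (player : String) : Prop :=
  ∀ row ∈ tictactoe, tictactoe.length ≤ row.length
instance (tictactoe : List (List String)) (player : String) : Decidable (Pre_get_n_cols tictactoe player) := by unfold Pre_get_n_cols; infer_instance
def pvWitness_get_n_cols : List (List String) × String := ([["x", "o"], ["x", "x"]], "x")

def Spec_get_n_cols (tictactoe : List (List String)) (player : String) (out : Int) : Prop := out = get_n_cols_alt tictactoe player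
instance (tictactoe : List (List String)) (player : String) (out : Int) : Decidable (Spec_get_n_cols tictactoe player out) := by unfold Spec_get_n_cols; infer_instance

-- ===== CLAIM (what is proved, stated in full; the proofs are below) =====
def Claim_equal_get_n_cols : Prop := ∀ (tictactoe : List (List String)) (player : String), Dom_get_n_cols tictactoe player → Pre_get_n_cols tictactoe player → Spec_get_n_cols tictactoe player (get_n_cols tictactoe player)

-- ===== LEMMAS AND PROOFS =====

-- per-column indicator used on both sides
def pvCol (player : String) (k : Nat) (row : List String) : Bool :=
  PySem.List.pyGetD row (k : Int) "" == player

-- B's tally loop, pointwise: entry k of the fold equals the initial entry plus the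
-- number of processed rows whose k-th cell is the player.
theorem pvFold_get (player : String) (rows : List (List String)) (counts : List Int) (k : Nat) :
    (rows.foldl (fun counts row =>
      (PySem.List.enumerate counts).map (fun ic =>
        ic.2 + (if PySem.List.pyGetD row ic.1 "" == player then (1:Int) else 0))) counts)[k]? =
    counts[k]?.map (fun c => c + (rows.countP (pvCol player k) : Int)) := by
  induction rows generalizing counts with
  | nil => cases h : counts[k]? <;> simp [h]
  | cons r rows ih =>
      simp only [List.foldl_cons, ih, List.getElem?_map,
        PySem.List.getElem?_enumerate, List.countP_cons]
      cases h : counts[k]? with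
      | none => simp
      | some c =>
          simp only [Option.map]
          simp [pvCol]
          ring

-- B's final tally list is the list of column counts.
theorem pvCounts_eq (player : String) (t : List (List String)) :
    (t.foldl (fun counts row =>
      (PySem.List.enumerate counts).map (fun ic =>
        ic.2 + (if PySem.List.pyGetD row ic.1 "" == player then (1:Int) else 0)))
      (List.replicate t.length 0)) =
    (List.range t.length).map (fun k => (t.countP (pvCol player k) : Int)) := by
  apply List.ext_getElem?
  intro k
  rw [pvFold_get]
  by_cases hk : k < t.length
  · simp [hk]
  · have h1 : (List.replicate t.length (0:Int))[k]? = none := by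
      simp [Nat.le_of_not_lt hk]
    have h2 : ((List.range t.length).map (fun k => (t.countP (pvCol player k) : Int)))[k]? = none := by
      simp [Nat.le_of_not_lt hk]
    simp [h1, h2]

-- ===== VERDICT (by name: the statement is the Claim_ definition above) =====
theorem get_n_cols_spec : Claim_equal_get_n_cols := by
  intro t player _ _
  unfold Spec_get_n_cols get_n_cols get_n_cols_alt
  simp only []
  -- B side
  rw [pvCounts_eq]
  rw [PySem.List.foldl_beq_add_one]
  -- A side: inner loop over j is a fold over the rows, hence a column count
  have hinner : ∀ i : Int,
      (PySem.List.pyRange 0 (t.length : Int) 1).foldl (fun os j =>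
        if PySem.List.pyGetD (PySem.List.pyGetD t j []) i "" == player then os + 1 else os) (0:Int) =
      (t.countP (fun row => PySem.List.pyGetD row i "" == player) : Int) := by
    intro i
    rw [PySem.List.foldl_pyRange_zero_pyGetD' t []
      (fun os row => if PySem.List.pyGetD row i "" == player then os + 1 else os) 0]
    rw [PySem.List.foldl_if_add_one]
    simp
  simp only [hinner]
  rw [PySem.List.foldl_if_add_one]
  -- both sides are counts over range t.length
  rw [PySem.List.pyRange_zero_natCast]
  simp only [List.countP_map, zero_add, List.count_eq_countP]
  congr 1
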